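-- pv_equiv track=rewrite | github.com/pypi-data/pypi-mirror-397 | packages/kytchen-rlm/kytchen_rlm-1.0.0-py3-none-any.whl/kytchen/converters/pages.py | join_with_boundaries
-- ===== SOURCE A (Python) =====
-- def join_with_boundaries(
--     pieces: list[tuple[int, str]],
--     separator: str = "\n\n",
-- ) -> tuple[str, list[dict[str, int]]]:
--     text_parts: list[str] = []
--     boundaries: list[dict[str, int]] = []
--
--     pos = 0
--     for i, (page_index, page_text) in enumerate(pieces):
--         if i > 0:
--             text_parts.append(separator)
--             pos += len(separator)
--
--         start = pos
--         text_parts.append(page_text)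
--         pos += len(page_text)
--         end = pos
--
--         boundaries.append(
--             {
--                 "page": int(page_index) + 1,
--                 "start_char": int(start),
--                 "end_char": int(end),
--                 "chars": int(end - start),
--             }
--         )
--
--     return "".join(text_parts), boundaries
-- ===== SOURCE B (Python) =====
-- def join_with_boundaries(
--     pieces: list[tuple[int, str]],
--     separator: str = "\n\n",
-- ) -> tuple[str, list[dict[str, int]]]:
--     texts = [pt for _, pt in pieces]
--     joined = separator.join(texts)
--     lens = [len(t) for t in texts]
--     sep_len = len(separator)
--     # offsets table: start of piece i in the joined text
--     starts = []
--     acc = 0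
--     for l in lens:
--         starts.append(acc)
--         acc += l + sep_len
--     boundaries = [
--         {"page": int(pi) + 1, "start_char": s, "end_char": s + l, "chars": l}
--         for (pi, _), s, l in zip(pieces, starts, lens)
--     ]
--     return joined, boundaries
-- ===== Notes on version B (the rewrite author's own statement) =====
-- stated objective: alternative
-- what changed: Replaces the single interleaved loop threading a running position through text parts and boundary dicts by a build-text-then-build-offset-table decomposition: the joined text comes directly from separator.join, and the boundaries from a precomputed starts table zipped with the pieces and their lengths.
import Mathlib
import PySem

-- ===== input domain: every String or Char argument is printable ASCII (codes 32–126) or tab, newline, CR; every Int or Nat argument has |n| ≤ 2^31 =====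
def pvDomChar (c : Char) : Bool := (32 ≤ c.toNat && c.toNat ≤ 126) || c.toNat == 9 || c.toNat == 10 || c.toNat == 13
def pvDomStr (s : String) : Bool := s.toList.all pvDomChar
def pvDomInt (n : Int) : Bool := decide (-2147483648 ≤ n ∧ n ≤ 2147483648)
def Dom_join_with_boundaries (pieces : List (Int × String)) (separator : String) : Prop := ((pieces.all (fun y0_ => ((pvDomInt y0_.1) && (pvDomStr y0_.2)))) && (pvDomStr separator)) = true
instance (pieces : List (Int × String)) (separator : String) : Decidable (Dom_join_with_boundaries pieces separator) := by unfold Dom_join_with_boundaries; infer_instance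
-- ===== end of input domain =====

-- B replaces A's single interleaved loop (a running `pos` threaded through text parts and
-- boundary dicts) by a different decomposition: join the texts directly, build a precomputed
-- starts table, then zip it with the pieces; objective: alternative.

-- ===== PORT A =====
-- literal transliteration of A's loop: state = (text_parts, boundaries, pos)
def join_with_boundaries (pieces : List (Int × String)) (separator : String) : String × (List (List (String × Int))) :=
  let st := (PySem.List.enumerate pieces).foldl
    (fun (st : List String × List (List (String × Int)) × Int) (ip : Int × (Int × String)) =>
      let parts := if ip.1 > 0 then st.1 ++ [separator] else st.1
      let pos := if ip.1 > 0 then st.2.2 + PySem.Str.len separator else st.2.2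
      let start := pos
      let parts := parts ++ [ip.2.2]
      let pos := pos + PySem.Str.len ip.2.2
      let e := pos
      (parts,
       st.2.1 ++ [[("page", ip.2.1 + 1), ("start_char", start), ("end_char", e), ("chars", e - start)]],
       pos))
    ([], [], 0)
  (PySem.Str.join "" st.1, st.2.1)

-- ===== PORT B =====
-- transliteration of Source B: joined text via separator.join; starts table via a fold over lens; zip
def join_with_boundaries_alt (pieces : List (Int × String)) (separator : String) : String × (List (List (String × Int))) :=
  let texts := pieces.map (·.2)
  let joined := PySem.Str.join separator texts
  let lens := texts.map PySem.Str.len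
  let sepLen := PySem.Str.len separator
  let starts := (lens.foldl (fun (st : List Int × Int) l => (st.1 ++ [st.2], st.2 + l + sepLen)) ([], 0)).1
  let boundaries := (pieces.zip (starts.zip lens)).map
    (fun x => [("page", x.1.1 + 1), ("start_char", x.2.1), ("end_char", x.2.1 + x.2.2), ("chars", x.2.2)])
  (joined, boundaries)

-- ===== PRECONDITION & SPEC =====
def Spec_join_with_boundaries (pieces : List (Int × String)) (separator : String) (out : String × (List (List (String × Int)))) : Prop := out = join_with_boundaries_alt pieces separator
instance (pieces : List (Int × String)) (separator : String) (out : String × (List (List (String × Int)))) : Decidable (Spec_join_with_boundaries pieces separator out) := by unfold Spec_join_with_boundaries; infer_instance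

-- ===== CLAIM (what is proved, stated in full; the proofs are below) =====
def Claim_equal_join_with_boundaries : Prop := ∀ (pieces : List (Int × String)) (separator : String), Dom_join_with_boundaries pieces separator → Spec_join_with_boundaries pieces separator (join_with_boundaries pieces separator)

-- ===== LEMMAS AND PROOFS =====

-- normal forms both ports are reduced to
def pvParts (separator : String) (t : List (Int × String)) : List String :=
  t.flatMap (fun p => [separator, p.2])

def pvBnds (separator : String) (a : Int) : List (Int × String) → List (List (String × Int))
  | [] => []
  | p :: t =>
      [("page", p.1 + 1), ("start_char", a), ("end_char", a + PySem.Str.len p.2),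
       ("chars", PySem.Str.len p.2)] ::
      pvBnds separator (a + PySem.Str.len p.2 + PySem.Str.len separator) t

def pvLen (separator : String) : List (Int × String) → Int
  | [] => 0
  | p :: t => PySem.Str.len separator + PySem.Str.len p.2 + pvLen separator t

def pvStarts (sepLen : Int) (acc : Int) : List Int → List Int
  | [] => []
  | l :: ls => acc :: pvStarts sepLen (acc + l + sepLen) ls

def pvAcc (sepLen : Int) (acc : Int) : List Int → Int
  | [] => acc
  | l :: ls => pvAcc sepLen (acc + l + sepLen) ls

-- A's loop over the tail pieces (loop index ≥ 1, so the separator branch always fires)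
theorem pvA_tail (separator : String) (t : List (Int × String)) :
    ∀ (s : Int) (parts : List String) (bnds : List (List (String × Int))) (pos : Int), 1 ≤ s →
    (PySem.List.enumerate t s).foldl
      (fun (st : List String × List (List (String × Int)) × Int) (ip : Int × (Int × String)) =>
        ((if ip.1 > 0 then st.1 ++ [separator] else st.1) ++ [ip.2.2],
         st.2.1 ++ [[("page", ip.2.1 + 1),
           ("start_char", if ip.1 > 0 then st.2.2 + PySem.Str.len separator else st.2.2),
           ("end_char", (if ip.1 > 0 then st.2.2 + PySem.Str.len separator else st.2.2) + PySem.Str.len ip.2.2),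
           ("chars", (if ip.1 > 0 then st.2.2 + PySem.Str.len separator else st.2.2) + PySem.Str.len ip.2.2 -
             if ip.1 > 0 then st.2.2 + PySem.Str.len separator else st.2.2)]],
         (if ip.1 > 0 then st.2.2 + PySem.Str.len separator else st.2.2) + PySem.Str.len ip.2.2))
      (parts, bnds, pos)
    = (parts ++ pvParts separator t,
       bnds ++ pvBnds separator (pos + PySem.Str.len separator) t,
       pos + pvLen separator t) := by
  induction t with
  | nil => intro s parts bnds pos hs; simp [PySem.List.enumerate_nil, pvParts, pvBnds, pvLen]
  | cons p t ih =>
      intro s parts bnds pos hs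
      rw [PySem.List.enumerate_cons, List.foldl_cons]
      have hpos : s > (0 : Int) := by omega
      simp only [hpos, if_pos]
      rw [ih (s + 1) _ _ _ (by omega)]
      refine Prod.ext ?_ (Prod.ext ?_ ?_)
      · simp [pvParts]
      · simp only [pvBnds]
        simp [add_assoc]
      · simp only [pvLen]; ring

-- B's starts-table fold
theorem pvB_starts (sepLen : Int) (lens : List Int) :
    ∀ (accL : List Int) (acc : Int),
    lens.foldl (fun (st : List Int × Int) l => (st.1 ++ [st.2], st.2 + l + sepLen)) (accL, acc)
    = (accL ++ pvStarts sepLen acc lens, pvAcc sepLen acc lens) := by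
  induction lens with
  | nil => intro accL acc; simp [pvStarts, pvAcc]
  | cons l ls ih => intro accL acc; rw [List.foldl_cons, ih]; simp [pvStarts, pvAcc]

-- B's zip-and-map equals the boundary normal form
theorem pvB_bnds (separator : String) (t : List (Int × String)) :
    ∀ (a : Int),
    (t.zip ((pvStarts (PySem.Str.len separator) a ((t.map (·.2)).map PySem.Str.len)).zip
        ((t.map (·.2)).map PySem.Str.len))).map
      (fun x => [("page", x.1.1 + 1), ("start_char", x.2.1), ("end_char", x.2.1 + x.2.2), ("chars", x.2.2)])
    = pvBnds separator a t := by
  induction t with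
  | nil => intro a; simp [pvStarts, pvBnds]
  | cons p t ih => intro a; simp only [List.map_cons, pvStarts, List.zip_cons_cons, pvBnds, ih]

-- joining "" over separator-interleaved parts = joining with the separator (List Char level)
theorem pvJoinChars (sep' : List Char) (ts : List (List Char)) :
    ∀ (x : List Char),
    PySem.Chars.join [] (x :: ts.flatMap (fun y => [sep', y])) = PySem.Chars.join sep' (x :: ts) := by
  induction ts with
  | nil => intro x; simp [PySem.Chars.join_singleton]
  | cons y ts ih =>
      intro x
      simp only [List.flatMap_cons, List.cons_append, List.nil_append]
      rw [PySem.Chars.join_cons_cons, PySem.Chars.join_cons_cons]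
      simp only [List.append_nil]
      rw [ih y]
      rw [PySem.Chars.join_cons_cons]
      simp [List.append_assoc]

-- the same at String level, over the pieces
theorem pvJoinStr (separator : String) (t : List (Int × String)) (x : String) :
    PySem.Str.join "" (x :: pvParts separator t) = PySem.Str.join separator (x :: t.map (·.2)) := by
  apply String.toList_inj.mp
  rw [PySem.Str.toList_join, PySem.Str.toList_join]
  have h : (pvParts separator t).map String.toList
      = (t.map (fun p => p.2.toList)).flatMap (fun y => [separator.toList, y]) := by
    simp [pvParts, List.map_flatMap, List.flatMap_map]
  simp only [List.map_cons, h]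
  have := pvJoinChars separator.toList (t.map (fun p => p.2.toList)) x.toList
  simpa using this

-- ===== VERDICT (by name: the statement is the Claim_ definition above) =====
theorem join_with_boundaries_spec : Claim_equal_join_with_boundaries := by
  intro pieces separator _
  unfold Spec_join_with_boundaries join_with_boundaries join_with_boundaries_alt
  cases pieces with
  | nil =>
      simp only [PySem.List.enumerate_nil, List.foldl_nil, List.map_nil, List.foldl_nil,
        List.zip_nil_left, List.map_nil]
      refine Prod.ext ?_ rfl
      apply String.toList_inj.mp
      simp [PySem.Str.toList_join, PySem.Chars.join_nil]
  | cons p t =>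
      rw [PySem.List.enumerate_cons, List.foldl_cons]
      simp only [show ¬((0:Int) > 0) from by omega]
      rw [pvA_tail separator t (0 + 1) _ _ _ (by omega)]
      rw [pvB_starts (PySem.Str.len separator) _ [] 0]
      simp only [List.nil_append]
      refine Prod.ext ?_ ?_
      · simpa using pvJoinStr separator t p.2
      · rw [pvB_bnds separator (p :: t) 0]
        simp [pvBnds]
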